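-- pv_equiv track=rewrite | github.com/AlsikeE/Ez | testbyxcj/mix/tools.py | _compare_put_all_in_tuple
-- ===== SOURCE A (Python) =====
-- def _compare_put_all_in_tuple(path_to_deal,raw_path):
--     target = []
--     length = len(path_to_deal)
--
--     i = 0
--     while(i < length):
--         dp = path_to_deal[i]
--         if(i == 0):
--             dplast = dp if(path_to_deal[0] == raw_path[0]) else raw_path[raw_path.index(dp) - 1]
--         else:
--             dplast = path_to_deal[i-1]
--         if(i == length - 1):
--             dpnext = dp if(path_to_deal[-1] == raw_path[-1]) else raw_path[raw_path.index(dp) + 1]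
--         else:
--             dpnext = path_to_deal[i] if (i==length-1) else path_to_deal[i+1]
--         target.append((dplast,dp,dpnext))
--         i += 1
--
--     return target
-- ===== SOURCE B (Python) =====
-- def _compare_put_all_in_tuple(path_to_deal, raw_path):
--     path = list(path_to_deal)
--     if not path:
--         return []
--     left = path[0] if path[0] == raw_path[0] else raw_path[raw_path.index(path[0]) - 1]
--     right = path[-1] if path[-1] == raw_path[-1] else raw_path[raw_path.index(path[-1]) + 1]
--     ext = [left] + path + [right]
--     return list(zip(ext, ext[1:], ext[2:]))
-- ===== Notes on version B (the rewrite author's own statement) =====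
-- stated objective: simpler
-- what changed: A's per-index while-loop with boundary conditionals inside every iteration is replaced by computing the left/right boundary neighbours once, extending the path with them, and zipping the extended list with its two shifted tails into sliding-window triples.
import Mathlib
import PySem

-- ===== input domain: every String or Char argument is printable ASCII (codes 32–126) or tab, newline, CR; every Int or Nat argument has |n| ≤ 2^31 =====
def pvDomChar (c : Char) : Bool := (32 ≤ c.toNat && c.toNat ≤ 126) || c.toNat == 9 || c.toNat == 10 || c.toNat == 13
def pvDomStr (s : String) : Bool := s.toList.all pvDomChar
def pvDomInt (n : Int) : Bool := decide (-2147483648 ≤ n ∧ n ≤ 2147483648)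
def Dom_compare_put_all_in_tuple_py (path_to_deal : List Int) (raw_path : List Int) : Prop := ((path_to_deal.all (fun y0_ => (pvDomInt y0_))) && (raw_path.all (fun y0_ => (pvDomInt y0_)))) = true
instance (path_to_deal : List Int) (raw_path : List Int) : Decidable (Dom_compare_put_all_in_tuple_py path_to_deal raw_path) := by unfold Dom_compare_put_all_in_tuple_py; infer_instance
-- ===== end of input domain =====

-- B replaces A's per-index boundary conditionals by one sliding window over the path
-- extended with the computed left/right boundary elements (objective: simpler).

-- ===== PORT A =====
-- literal transliteration of A's while-loop (i = 0 .. length-1, appending triples);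
-- the `.getD 0` defaults are only reached where the Python raises (excluded by Pre_)
def compare_put_all_in_tuple_py (path_to_deal : List Int) (raw_path : List Int) : List (Int × Int × Int) :=
  let length := path_to_deal.length
  (List.range length).foldl (fun target i =>
    let dp := (PySem.List.pyGet? path_to_deal (i : Int)).getD 0
    let dplast :=
      if i = 0 then
        if (PySem.List.pyGet? path_to_deal 0).getD 0 = (PySem.List.pyGet? raw_path 0).getD 0 then dp
        else (PySem.List.pyGet? raw_path ((((PySem.List.index? raw_path dp).getD 0 : Nat) : Int) - 1)).getD 0
      else (PySem.List.pyGet? path_to_deal ((i : Int) - 1)).getD 0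
    let dpnext :=
      if i = length - 1 then
        if (PySem.List.pyGet? path_to_deal (-1)).getD 0 = (PySem.List.pyGet? raw_path (-1)).getD 0 then dp
        else (PySem.List.pyGet? raw_path ((((PySem.List.index? raw_path dp).getD 0 : Nat) : Int) + 1)).getD 0
      else
        if i = length - 1 then (PySem.List.pyGet? path_to_deal (i : Int)).getD 0
        else (PySem.List.pyGet? path_to_deal ((i : Int) + 1)).getD 0
    target ++ [(dplast, dp, dpnext)]) []

-- ===== PORT B =====
-- literal transliteration of Source B: guard empty, compute left/right once, build
-- ext = [left] + path + [right], return zip(ext, ext[1:], ext[2:])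
def compare_put_all_in_tuple_py_alt (path_to_deal : List Int) (raw_path : List Int) : List (Int × Int × Int) :=
  let path := path_to_deal
  if path.isEmpty then []
  else
    let p0 := (PySem.List.pyGet? path 0).getD 0
    let pn := (PySem.List.pyGet? path (-1)).getD 0
    let left :=
      if p0 = (PySem.List.pyGet? raw_path 0).getD 0 then p0
      else (PySem.List.pyGet? raw_path ((((PySem.List.index? raw_path p0).getD 0 : Nat) : Int) - 1)).getD 0
    let right :=
      if pn = (PySem.List.pyGet? raw_path (-1)).getD 0 then pn
      else (PySem.List.pyGet? raw_path ((((PySem.List.index? raw_path pn).getD 0 : Nat) : Int) + 1)).getD 0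
    let ext := left :: (path ++ [right])
    List.zip ext (List.zip (PySem.List.slice ext (some 1) none) (PySem.List.slice ext (some 2) none))

-- ===== PRECONDITION & SPEC =====
-- Pre_ excludes exactly the inputs where the Python A raises (IndexError on empty
-- raw_path, ValueError/IndexError from the boundary `.index` lookups); B raises on
-- exactly the same inputs, so nothing A returns on is excluded.
def Pre_compare_put_all_in_tuple_py (path_to_deal : List Int) (raw_path : List Int) : Prop :=
  path_to_deal = [] ∨
    (raw_path ≠ [] ∧ path_to_deal.headD 0 ∈ raw_path ∧
      (path_to_deal.getLastD 0 = raw_path.getLastD 0 ∨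
        raw_path.idxOf (path_to_deal.getLastD 0) + 1 < raw_path.length))
instance (path_to_deal : List Int) (raw_path : List Int) : Decidable (Pre_compare_put_all_in_tuple_py path_to_deal raw_path) := by unfold Pre_compare_put_all_in_tuple_py; infer_instance

def pvWitness_compare_put_all_in_tuple_py : List Int × List Int := ([1, 2], [0, 1, 2, 3])

def Spec_compare_put_all_in_tuple_py (path_to_deal : List Int) (raw_path : List Int) (out : List (Int × Int × Int)) : Prop := out = compare_put_all_in_tuple_py_alt path_to_deal raw_path
instance (path_to_deal : List Int) (raw_path : List Int) (out : List (Int × Int × Int)) : Decidable (Spec_compare_put_all_in_tuple_py path_to_deal raw_path out) := by unfold Spec_compare_put_all_in_tuple_py; infer_instance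

-- ===== CLAIM (what is proved, stated in full; the proofs are below) =====
def Claim_equal_compare_put_all_in_tuple_py : Prop := ∀ (path_to_deal : List Int) (raw_path : List Int), Dom_compare_put_all_in_tuple_py path_to_deal raw_path → Pre_compare_put_all_in_tuple_py path_to_deal raw_path → Spec_compare_put_all_in_tuple_py path_to_deal raw_path (compare_put_all_in_tuple_py path_to_deal raw_path)

-- ===== LEMMAS AND PROOFS =====

theorem compare_put_all_in_tuple_py_total_eq (p r : List Int) :
    compare_put_all_in_tuple_py p r = compare_put_all_in_tuple_py_alt p r := by
  rcases p with _ | ⟨a, ps⟩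
  · rfl
  unfold compare_put_all_in_tuple_py compare_put_all_in_tuple_py_alt
  simp only [List.isEmpty_cons, Bool.false_eq_true, if_false,
    PySem.List.slice_from _ (by norm_num : (0:Int) ≤ 1),
    PySem.List.slice_from _ (by norm_num : (0:Int) ≤ 2)]
  rw [PySem.List.foldl_append_singleton_eq_map]
  simp only [List.pure_def, List.bind_eq_flatMap,
    List.nil_append, Int.toNat_one, show Int.toNat 2 = 2 from rfl, List.cons_append,
    List.drop_succ_cons, List.drop_zero]
  rw [show List.flatMap (fun a : Nat => [(a:Int)]) (List.range (a :: ps).length)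
        = (List.range (a :: ps).length).map (fun a : Nat => (a:Int)) from (List.map_eq_flatMap).symm]
  rw [List.map_map]
  apply List.ext_getElem
  · simp
  intro i h1 h2
  simp only [List.getElem_map, List.getElem_range, Function.comp_apply, List.getElem_zip]
  have hn : i < ps.length + 1 := by simpa using h1
  have hext : ∀ (R x : Int) (j : Nat) (hj : j < ps.length + 1),
      (x :: (ps ++ [R]))[j]'(by simp; omega) = (x :: ps)[j]'(by simp; omega) := by
    intro R x j hj
    exact List.getElem_append_left (as := x :: ps) (bs := [R]) (by simp; omega)
  simp only [Prod.mk.injEq]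
  refine ⟨?_, ?_, ?_⟩
  · by_cases h0 : i = 0
    · subst h0
      rw [if_pos (by norm_num)]
      simp
    · obtain ⟨j, rfl⟩ : ∃ j, i = j + 1 := ⟨i - 1, by omega⟩
      rw [if_neg (by omega)]
      rw [show ((j + 1 : Nat) : Int) - 1 = ((j : Nat) : Int) by push_cast; ring]
      rw [PySem.List.pyGet?_natCast]
      rw [List.getElem_cons_succ, hext _ a j (by omega)]
      rw [List.getElem?_eq_getElem (by simp; omega)]
      rfl
  · rw [hext _ a i hn, PySem.List.pyGet?_natCast,
        List.getElem?_eq_getElem (by simpa using hn)]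
    rfl
  · by_cases hL : i = ps.length
    · rw [if_pos (by subst hL; simp)]
      rw [List.getElem_concat_length hL]
      have hdp : (PySem.List.pyGet? (a :: ps) ((i : Nat) : Int)).getD 0
          = (PySem.List.pyGet? (a :: ps) (-1)).getD 0 := by
        subst hL
        rw [PySem.List.pyGet?_natCast, PySem.List.pyGet?_neg_one, List.getLast?_eq_getElem?]
        simp
      rw [hdp]
    · rw [if_neg (by simp only [List.length_cons]; push_cast; omega), if_neg (by simp only [List.length_cons]; push_cast; omega)]
      rw [show ((i : Nat) : Int) + 1 = ((i + 1 : Nat) : Int) by push_cast; ring]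
      rw [PySem.List.pyGet?_natCast]
      rw [List.getElem_append_left (by omega : i < ps.length)]
      rw [List.getElem?_eq_getElem (by simp; omega)]
      simp


-- ===== VERDICT (by name: the statement is the Claim_ definition above) =====
theorem compare_put_all_in_tuple_py_spec : Claim_equal_compare_put_all_in_tuple_py := by
  intro p r _ _
  exact compare_put_all_in_tuple_py_total_eq p r
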